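-- pv_equiv track=rewrite | github.com/able8888/turbo-adventure | 取石子游戏.py | f
-- ===== SOURCE A (Python) =====
-- def f(n,m):
--     if n<m:
--         n,m=m,n
--     if n//m>1:
--         return 'win'
--
--     i=0
--     while n//m==1:
--         n,m=m,n%m
--         i+=1
--         if m == 0:
--             break
--     if i%2==1:
--         return 'lose'
--     else:
--         return 'win'
-- ===== SOURCE B (Python) =====
-- def f(n, m):
--     # Recursive judge over the Euclidean reduction instead of an i-counting while loop.
--     def wins(a, b):
--         q = a // b
--         if q != 1:
--             return True
--         r = a % b
--         if r == 0:
--             return False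
--         return not wins(b, r)
--     return 'win' if wins(max(n, m), min(n, m)) else 'lose'
-- ===== Notes on version B (the rewrite author's own statement) =====
-- stated objective: alternative
-- what changed: A's while loop counting Euclidean steps into a counter i whose parity decides the result is replaced by a recursive win/lose judge over the Euclidean reduction (True if quotient != 1, False on exact division, otherwise negate the recursive call).
import Mathlib
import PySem

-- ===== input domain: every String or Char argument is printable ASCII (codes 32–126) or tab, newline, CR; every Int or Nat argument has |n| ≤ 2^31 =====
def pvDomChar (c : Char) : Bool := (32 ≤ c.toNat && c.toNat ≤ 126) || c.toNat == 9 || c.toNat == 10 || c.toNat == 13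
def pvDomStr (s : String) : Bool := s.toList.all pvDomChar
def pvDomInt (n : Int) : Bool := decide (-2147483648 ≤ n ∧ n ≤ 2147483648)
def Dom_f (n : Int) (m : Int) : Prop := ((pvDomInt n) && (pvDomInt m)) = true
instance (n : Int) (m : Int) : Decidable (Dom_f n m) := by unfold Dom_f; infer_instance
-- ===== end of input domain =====

-- B replaces A's i-counting while loop by a recursive win/lose judge over the Euclidean
-- reduction (objective: alternative decomposition, same cost).

-- termination helper used by both ports (the Euclidean remainder shrinks in absolute value)
theorem pvModAbsLt (n m : Int) (hm : m ≠ 0) : (PySem.Int.mod n m).natAbs < m.natAbs := by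
  rcases lt_or_gt_of_ne hm with h | h
  · have h1 := PySem.Int.mod_neg_bounds n h
    omega
  · have h1 := PySem.Int.mod_nonneg n h
    have h2 := PySem.Int.mod_lt n h
    omega

-- ===== PORT A =====
-- the while loop of A: returns the final value of the counter i
def fLoop (n : Int) (m : Int) (i : Int) : Int :=
  if PySem.Int.floordiv n m = 1 then
    let m' := PySem.Int.mod n m
    if h : m' = 0 then i + 1
    else fLoop m m' (i + 1)
  else i
termination_by m.natAbs
decreasing_by
  exact pvModAbsLt n m (by intro h0; simp [PySem.Int.floordiv, h0] at *)

def f (n : Int) (m : Int) : String :=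
  let p := if n < m then (m, n) else (n, m)
  let n := p.1
  let m := p.2
  if PySem.Int.floordiv n m > 1 then "win"
  else
    let i := fLoop n m 0
    if PySem.Int.mod i 2 = 1 then "lose" else "win"

-- ===== PORT B =====
-- does the player to move win from the (ordered) pile pair (a, b)?
def wins (a : Int) (b : Int) : Bool :=
  if PySem.Int.floordiv a b ≠ 1 then true
  else if _h : PySem.Int.mod a b = 0 then false
  else !wins b (PySem.Int.mod a b)
termination_by b.natAbs
decreasing_by
  exact pvModAbsLt a b (by intro h0; subst h0; simp [PySem.Int.floordiv] at *)

def f_alt (n : Int) (m : Int) : String :=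
  if wins (max n m) (min n m) then "win" else "lose"

-- ===== PRECONDITION & SPEC =====
-- A raises ZeroDivisionError exactly when the smaller argument is 0 (B raises there too).
def Pre_f (n : Int) (m : Int) : Prop := min n m ≠ 0
instance (n : Int) (m : Int) : Decidable (Pre_f n m) := by unfold Pre_f; infer_instance
def pvWitness_f : Int × Int := (13, 8)

def Spec_f (n : Int) (m : Int) (out : String) : Prop := out = f_alt n m
instance (n : Int) (m : Int) (out : String) : Decidable (Spec_f n m out) := by unfold Spec_f; infer_instance

-- ===== CLAIM (what is proved, stated in full; the proofs are below) =====
def Claim_equal_f : Prop := ∀ (n : Int) (m : Int), Dom_f n m → Pre_f n m → Spec_f n m (f n m)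

-- ===== LEMMAS AND PROOFS =====

-- invariant: the loop counter's final parity equals i's parity iff the mover wins
theorem fLoop_wins : ∀ (k : Nat) (m n i : Int), m.natAbs ≤ k →
    (PySem.Int.mod (fLoop n m i) 2 = PySem.Int.mod i 2 ↔ wins n m = true) := by
  intro k
  induction k with
  | zero =>
    intro m n i hk
    have hm : m = 0 := by omega
    subst hm
    rw [fLoop, wins]
    simp [PySem.Int.floordiv]
  | succ k ih =>
    intro m n i hk
    rw [fLoop, wins]
    by_cases hq : PySem.Int.floordiv n m = 1
    · have hm : m ≠ 0 := by
        intro h0; rw [h0] at hq; simp [PySem.Int.floordiv] at hq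
      have e2 := PySem.Int.mod_eq_emod_of_pos (a := i + 1) (by omega : (0:Int) < 2)
      have e3 := PySem.Int.mod_eq_emod_of_pos (a := i) (by omega : (0:Int) < 2)
      by_cases hr : PySem.Int.mod n m = 0
      · simp only [hq, hr, dif_pos, ite_not, if_true]
        have e1 := PySem.Int.mod_eq_emod_of_pos (a := (i:Int) + 1) (by omega : (0:Int) < 2)
        constructor
        · intro h; rw [e2, e3] at h; omega
        · intro h; exact absurd h (by simp)
      · have hlt := pvModAbsLt n m hm
        have ihr := ih (PySem.Int.mod n m) m (i + 1) (by omega)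
        simp only [hq, dif_neg hr, ite_not, if_true]
        have e1 := PySem.Int.mod_eq_emod_of_pos
          (a := fLoop m (PySem.Int.mod n m) (i + 1)) (by omega : (0:Int) < 2)
        rw [e1, e2] at ihr
        rw [e1, e3]
        cases hw : wins m (PySem.Int.mod n m) with
        | false => rw [hw] at ihr; simp at ihr ⊢; omega
        | true => rw [hw] at ihr; simp at ihr ⊢; omega
    · simp [hq]

-- the ordered pair the two ports start from is the same
theorem swap_eq (n m : Int) :
    (if n < m then (m, n) else (n, m)) = (max n m, min n m) := by
  by_cases h : n < m <;> simp [h, max_def, min_def] <;> omega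

theorem f_spec : Claim_equal_f := by
  intro n m _ _
  unfold Spec_f f f_alt
  rw [swap_eq]
  simp only []
  by_cases hq : PySem.Int.floordiv (max n m) (min n m) > 1
  · rw [if_pos hq, wins]
    simp [show PySem.Int.floordiv (max n m) (min n m) ≠ 1 by omega]
  · rw [if_neg hq]
    have key := fLoop_wins (min n m).natAbs (min n m) (max n m) 0 (le_refl _)
    have e0 : PySem.Int.mod 0 2 = 0 := by decide
    rw [e0] at key
    have e1 := PySem.Int.mod_two_eq (fLoop (max n m) (min n m) 0)
    cases hw : wins (max n m) (min n m) with
    | true =>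
      rw [hw] at key
      have h0 : PySem.Int.mod (fLoop (max n m) (min n m) 0) 2 = 0 := key.mpr rfl
      rw [if_neg (by omega)]
      rfl
    | false =>
      rw [hw] at key
      have h1 : PySem.Int.mod (fLoop (max n m) (min n m) 0) 2 ≠ 0 := by
        intro h; exact absurd (key.mp h) (by simp)
      have hm1 : PySem.Int.mod (fLoop (max n m) (min n m) 0) 2 = 1 := by
        rcases e1 with h | h
        · exact absurd h h1
        · exact h
      rw [if_pos hm1]
      rfl
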